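-- pv_equiv track=rewrite | github.com/leen-1999/Python_elzero | exercises.py | finding
-- ===== SOURCE A (Python) =====
-- def finding(liste):
--     nineteen = 0
--     five = 0
--     for i in liste:
--         if i == 19:
--             nineteen += 1
--             if nineteen == 2:
--                 continue
--         if i == 5:
--             five += 1
--     if (nineteen == 2) and (five >= 3):
--         return True
--     else:
--         return False
-- ===== SOURCE B (Python) =====
-- # DFA over 16 states s = 4*min(count19,3) + min(count5,3); accepting state 11 (=4*2+3).
-- _T = [[s, min(s // 4 + 1, 3) * 4 + s % 4, s // 4 * 4 + min(s % 4 + 1, 3)]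
--       for s in range(16)]
--
-- def finding(liste):
--     s = 0
--     for x in liste:
--         s = _T[s][1 if x == 19 else 2 if x == 5 else 0]
--     return s == 11
-- ===== Notes on version B (the rewrite author's own statement) =====
-- stated objective: alternative
-- what changed: Replaces the two running counters and final comparison by a precomputed 16-state DFA transition table (states encode the two counts saturated at 3) folded over the list with a single accepting state.
import Mathlib
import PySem

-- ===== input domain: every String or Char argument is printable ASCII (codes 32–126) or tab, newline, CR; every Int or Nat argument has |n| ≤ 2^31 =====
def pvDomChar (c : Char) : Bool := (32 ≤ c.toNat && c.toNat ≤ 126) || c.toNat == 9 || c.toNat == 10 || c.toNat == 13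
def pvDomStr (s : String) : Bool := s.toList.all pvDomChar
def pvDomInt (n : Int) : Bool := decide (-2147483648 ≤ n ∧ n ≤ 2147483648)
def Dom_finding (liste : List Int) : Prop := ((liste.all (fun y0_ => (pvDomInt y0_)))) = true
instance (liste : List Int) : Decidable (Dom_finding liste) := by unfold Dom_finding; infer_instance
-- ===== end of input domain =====

-- B replaces A's counting loop by a 16-state DFA: a precomputed transition table folded over the list; objective: alternative.

-- ===== PORT A =====
-- the for-loop over liste, carrying (nineteen, five)
def findingLoop : List Int → Int → Int → Int × Int
  | [], nineteen, five => (nineteen, five)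
  | i :: rest, nineteen, five =>
    if i == 19 then
      let nineteen' := nineteen + 1
      if nineteen' == 2 then
        findingLoop rest nineteen' five          -- continue
      else
        if i == 5 then findingLoop rest nineteen' (five + 1)
        else findingLoop rest nineteen' five
    else
      if i == 5 then findingLoop rest nineteen (five + 1)
      else findingLoop rest nineteen five

def finding (liste : List Int) : Bool :=
  let r := findingLoop liste 0 0
  if r.1 == 2 && r.2 ≥ 3 then true else false

-- ===== PORT B =====
-- _T = [[s, min(s//4+1,3)*4 + s%4, s//4*4 + min(s%4+1,3)] for s in range(16)]
def bT : List (List Int) :=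
  (PySem.List.pyRange 0 16 1).map (fun s =>
    [s,
     (min (PySem.Int.floordiv s 4 + 1) 3) * 4 + PySem.Int.mod s 4,
     PySem.Int.floordiv s 4 * 4 + min (PySem.Int.mod s 4 + 1) 3])

-- s = _T[s][1 if x == 19 else 2 if x == 5 else 0]  (indices always in range; .getD 0/[] only makes the lookup total)
def bStep (s x : Int) : Int :=
  (PySem.List.pyGet? ((PySem.List.pyGet? bT s).getD [])
      (if x == 19 then 1 else if x == 5 then 2 else 0)).getD 0

def finding_alt (liste : List Int) : Bool :=
  (liste.foldl bStep 0) == 11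

-- ===== PRECONDITION & SPEC =====
def Spec_finding (liste : List Int) (out : Bool) : Prop := out = finding_alt liste
instance (liste : List Int) (out : Bool) : Decidable (Spec_finding liste out) := by unfold Spec_finding; infer_instance

-- ===== CLAIM (what is proved, stated in full; the proofs are below) =====
def Claim_equal_finding : Prop := ∀ (liste : List Int), Dom_finding liste → Spec_finding liste (finding liste)

-- ===== LEMMAS AND PROOFS =====
theorem findingLoop_eq (liste : List Int) (n f : Int) :
    findingLoop liste n f = (n + (liste.count 19 : Int), f + (liste.count 5 : Int)) := by
  induction liste generalizing n f with
  | nil => simp [findingLoop]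
  | cons i rest ih =>
    by_cases h19 : i = 19
    · subst h19
      simp only [findingLoop, beq_self_eq_true, if_true]
      have : ((19 : Int) == 5) = false := by decide
      rw [this]
      split <;> simp [ih] <;> ring
    · by_cases h5 : i = 5
      · subst h5
        simp [findingLoop, ih]
        ring
      · simp [findingLoop, h19, h5, ih]

theorem bStep_eq (a b : Int) (ha0 : 0 ≤ a) (ha3 : a ≤ 3) (hb0 : 0 ≤ b) (hb3 : b ≤ 3) (x : Int) :
    bStep (4 * a + b) x
      = 4 * min (a + (if x = 19 then 1 else 0)) 3 + min (b + (if x = 5 then 1 else 0)) 3 := by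
  by_cases h19 : x = 19
  · subst h19
    interval_cases a <;> interval_cases b <;> decide
  · by_cases h5 : x = 5
    · subst h5
      interval_cases a <;> interval_cases b <;> decide
    · simp only [bStep, beq_iff_eq, h19, h5, if_false]
      interval_cases a <;> interval_cases b <;> decide

theorem foldl_bStep_eq (l : List Int) (a b : Int)
    (ha0 : 0 ≤ a) (ha3 : a ≤ 3) (hb0 : 0 ≤ b) (hb3 : b ≤ 3) :
    l.foldl bStep (4 * a + b)
      = 4 * min (a + (l.count 19 : Int)) 3 + min (b + (l.count 5 : Int)) 3 := by
  induction l generalizing a b with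
  | nil => simp; omega
  | cons x rest ih =>
    rw [List.foldl_cons, bStep_eq a b ha0 ha3 hb0 hb3 x,
        ih _ _ (by positivity) (by omega) (by positivity) (by omega)]
    simp only [List.count_cons]
    by_cases h19 : x = 19 <;> by_cases h5 : x = 5 <;>
      simp [h19, h5] <;> omega

-- ===== VERDICT (by name: the statement is the Claim_ definition above) =====
theorem finding_spec : Claim_equal_finding := by
  intro liste _
  unfold Spec_finding finding finding_alt
  rw [findingLoop_eq]
  have hB : liste.foldl bStep 0
      = 4 * min ((liste.count 19 : Int)) 3 + min ((liste.count 5 : Int)) 3 := by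
    have := foldl_bStep_eq liste 0 0 (by norm_num) (by norm_num) (by norm_num) (by norm_num)
    simpa using this
  rw [hB]
  by_cases h1 : (liste.count 19 : Int) = 2 <;> by_cases h2 : (3 : Int) ≤ liste.count 5 <;>
    simp [h1, h2] <;> omega
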